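-- pv_equiv track=rewrite | github.com/Noctsyndrome/graph-agent | src/kgqa/agent.py | _messages_for_prompt
-- ===== SOURCE A (Python) =====
-- from typing import Any, Iterator
--
-- def _messages_for_prompt(messages: list[dict[str, Any]]) -> str:
--     """Extract user questions and assistant final answers, skipping tool
--     call / tool result noise so the context window covers more turns."""
--     qa_lines: list[str] = []
--     for message in messages:
--         role = str(message.get("role", "unknown"))
--         if role == "tool":
--             continue
--         if role == "assistant" and message.get("toolCalls"):
--             continue
--         content = message.get("content", "")
--         if isinstance(content, list):
--             content = "".join(
--                 str(part.get("text", "")) for part in content if isinstance(part, dict)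
--             )
--         content = str(content).strip()
--         if not content:
--             continue
--         qa_lines.append(f"[{role}] {content}")
--     # Last 10 Q&A entries ≈ 5 full conversation turns
--     return "\n".join(qa_lines[-10:])
-- ===== SOURCE B (Python) =====
-- def _line_for(message):
--     role = str(message.get("role", "unknown"))
--     if role == "tool":
--         return None
--     if role == "assistant" and message.get("toolCalls"):
--         return None
--     content = message.get("content", "")
--     if isinstance(content, list):
--         content = "".join(
--             str(part.get("text", "")) for part in content if isinstance(part, dict)
--         )
--     content = str(content).strip()
--     if not content:
--         return None
--     return f"[{role}] {content}"
--
--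
-- def _messages_for_prompt(messages):
--     """Scan from the newest message backwards, stop after 10 kept lines."""
--     buf = []
--     for message in reversed(messages):
--         line = _line_for(message)
--         if line is None:
--             continue
--         buf.append(line)
--         if len(buf) == 10:
--             break
--     return "\n".join(reversed(buf))
-- ===== Notes on version B (the rewrite author's own statement) =====
-- stated objective: alternative
-- what changed: B scans the messages newest-first with an early break once 10 qualifying lines are collected and reverses the buffer, instead of formatting every message and slicing the last 10; it trades the full pass for a bounded tail scan.
import Mathlib
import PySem

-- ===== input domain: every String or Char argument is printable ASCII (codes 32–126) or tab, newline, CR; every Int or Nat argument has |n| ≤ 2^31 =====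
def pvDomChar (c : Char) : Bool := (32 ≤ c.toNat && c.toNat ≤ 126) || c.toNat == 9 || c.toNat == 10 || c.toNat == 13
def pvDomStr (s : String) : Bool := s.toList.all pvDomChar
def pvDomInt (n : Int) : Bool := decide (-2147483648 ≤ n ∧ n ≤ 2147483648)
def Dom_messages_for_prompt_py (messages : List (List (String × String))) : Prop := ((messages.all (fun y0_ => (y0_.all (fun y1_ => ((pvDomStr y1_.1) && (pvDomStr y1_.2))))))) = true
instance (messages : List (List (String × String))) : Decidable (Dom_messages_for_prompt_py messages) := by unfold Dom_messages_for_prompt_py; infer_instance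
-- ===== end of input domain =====

-- B scans the messages from the newest backwards and stops after collecting 10 lines,
-- instead of formatting all messages and slicing the last 10.

-- ===== PORT A =====
-- Under the type convention every dict value is a str, so `isinstance(content, list)`
-- is always False and that branch is omitted; `message.get(k)` truthiness = value ≠ "".
def messages_for_prompt_py (messages : List (List (String × String))) : String :=
  let qa_lines := messages.foldl (fun qa_lines message =>
    let role := (PySem.Dict.mk message).getD "role" "unknown"
    if role == "tool" then qa_lines
    else if role == "assistant" && !((PySem.Dict.mk message).getD "toolCalls" "" == "") then qa_lines
    else
      let content := PySem.Str.strip ((PySem.Dict.mk message).getD "content" "")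
      if content == "" then qa_lines
      else qa_lines ++ ["[" ++ role ++ "] " ++ content]) []
  PySem.Str.join "\n" (PySem.List.slice qa_lines (some (-10)) none)

-- ===== PORT B =====
def pvLineFor (message : List (String × String)) : Option String :=
  let role := (PySem.Dict.mk message).getD "role" "unknown"
  if role == "tool" then none
  else if role == "assistant" && !((PySem.Dict.mk message).getD "toolCalls" "" == "") then none
  else
    let content := PySem.Str.strip ((PySem.Dict.mk message).getD "content" "")
    if content == "" then none
    else some ("[" ++ role ++ "] " ++ content)

-- the reversed loop with the `len(buf) == 10` break
def pvTail10 : List (List (String × String)) → List String → List String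
  | [], buf => buf
  | message :: rest, buf =>
    match pvLineFor message with
    | none => pvTail10 rest buf
    | some line =>
      let buf' := buf ++ [line]
      if buf'.length == 10 then buf' else pvTail10 rest buf'

def messages_for_prompt_py_alt (messages : List (List (String × String))) : String :=
  PySem.Str.join "\n" (pvTail10 messages.reverse []).reverse

-- ===== PRECONDITION & SPEC =====
def Spec_messages_for_prompt_py (messages : List (List (String × String))) (out : String) : Prop := out = messages_for_prompt_py_alt messages
instance (messages : List (List (String × String))) (out : String) : Decidable (Spec_messages_for_prompt_py messages out) := by unfold Spec_messages_for_prompt_py; infer_instance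

-- ===== CLAIM (what is proved, stated in full; the proofs are below) =====
def Claim_equal_messages_for_prompt_py : Prop := ∀ (messages : List (List (String × String))), Dom_messages_for_prompt_py messages → Spec_messages_for_prompt_py messages (messages_for_prompt_py messages)

-- ===== LEMMAS AND PROOFS =====

-- A's loop accumulates exactly the lines pvLineFor keeps
theorem pvFoldA_eq_filterMap (l : List (List (String × String))) (acc : List String) :
    l.foldl (fun qa_lines message =>
      let role := (PySem.Dict.mk message).getD "role" "unknown"
      if role == "tool" then qa_lines
      else if role == "assistant" && !((PySem.Dict.mk message).getD "toolCalls" "" == "") then qa_lines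
      else
        let content := PySem.Str.strip ((PySem.Dict.mk message).getD "content" "")
        if content == "" then qa_lines
        else qa_lines ++ ["[" ++ role ++ "] " ++ content]) acc
    = acc ++ l.filterMap pvLineFor := by
  induction l generalizing acc with
  | nil => simp
  | cons m rest ih =>
    have hstep : (let role := (PySem.Dict.mk m).getD "role" "unknown"
        if role == "tool" then acc
        else if role == "assistant" && !((PySem.Dict.mk m).getD "toolCalls" "" == "") then acc
        else
          let content := PySem.Str.strip ((PySem.Dict.mk m).getD "content" "")
          if content == "" then acc
          else acc ++ ["[" ++ role ++ "] " ++ content])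
        = acc ++ (pvLineFor m).toList := by
      simp only [pvLineFor]
      split_ifs <;> simp
    rw [List.foldl_cons, hstep, ih, List.filterMap_cons]
    cases pvLineFor m <;> simp

-- B's loop collects the first `10 - buf.length` kept lines, appended to buf
theorem pvTail10_spec (l : List (List (String × String))) (buf : List String)
    (h : buf.length < 10) :
    pvTail10 l buf = buf ++ (l.filterMap pvLineFor).take (10 - buf.length) := by
  induction l generalizing buf with
  | nil => simp [pvTail10]
  | cons m rest ih =>
    simp only [pvTail10, List.filterMap_cons]
    cases hm : pvLineFor m with
    | none => simp [ih buf h]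
    | some line =>
      simp only [List.length_append, List.length_singleton]
      by_cases h10 : buf.length + 1 = 10
      · have : 10 - buf.length = 1 := by omega
        simp [h10, this]
      · have hlt : (buf ++ [line]).length < 10 := by simp; omega
        rw [if_neg (by simpa using h10), ih (buf ++ [line]) hlt]
        have hk : 10 - buf.length = (10 - (buf ++ [line]).length) + 1 := by simp; omega
        rw [hk, List.take_succ_cons, List.append_assoc]
        rfl

-- ===== VERDICT (by name: the statement is the Claim_ definition above) =====
theorem messages_for_prompt_py_spec : Claim_equal_messages_for_prompt_py := by
  intro messages _
  unfold Spec_messages_for_prompt_py messages_for_prompt_py messages_for_prompt_py_alt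
  rw [pvFoldA_eq_filterMap, pvTail10_spec messages.reverse [] (by simp), List.filterMap_reverse]
  simp only [List.nil_append, List.length_nil, Nat.sub_zero, List.take_reverse, List.reverse_reverse]
  rw [PySem.List.slice_from_neg_ofNat _ 10 (by omega)]
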